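-- pv_equiv track=rewrite | github.com/devBorisG/Complejidad_Algoritmos | Ejercicios/PacMan/main.py | theBestWay
-- ===== SOURCE A (Python) =====
-- def theBestWay(gameBoard):
--     """analyzes the best result the player can obtain by going through the array and getting as many
--     points as possible before encountering a ghost
--
--     Args:
--         gameBoard (array): Contains the Game Board already filled with the data provided by the player
--
--     Returns:
--         int: Returns the number of the maximum amount of meal pacman can have
--     """
--     count = 0                               # 1 OE                                                  #
--     aux = 0                                 # 1 OE                                                  #
--     item = ''                               # 1 OE                                                  #
--     n = len(gameBoard[0])                   # 3 OE                                                  #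
--     for i in range(n):                      # n OE                                                  #
--         for j in range(n):                      # n OE                                  #           #
--             if (i+1)%2!=0:                          # 3 OE                    #         #           #
--                 item = gameBoard[i][j]                  # 2 OE                #         #           #
--             else:
--                 item = gameBoard[i][n-1-j]              # 4 OE      # 6 OE    #         #           #
--             if item == 'A':                         # 1 OE                    #         #           #
--                 if aux < count:                         # 1 OE                #         #           #
--                     aux = count                             # 1 OE  # 2 OE    #         #           #
--                 count = 0                               # 1 OE                #         #           #
--             elif item == 'o':                       # 1 OE                    #         #           #
--                 count += 1                              # 1 OE      # 1 OE    # 21 OE   # 21n OE    #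
--     if aux < count:                         # 1 OE                                      #           #
--         aux = count                             # 1 OE                                  # 1 OE      # TOTAL: (21n + 8) OE
--     return aux                              # 1 OE                                                  #
-- ===== SOURCE B (Python) =====
-- def theBestWay(gameBoard):
--     n = len(gameBoard[0])
--     # build the cells in snake order
--     flat = []
--     for i in range(n):
--         row = gameBoard[i][:n]
--         flat += row if i % 2 == 0 else row[::-1]
--     # split at ghosts, count meals per segment, take the max
--     segments = []
--     cur = []
--     for item in flat:
--         if item == 'A':
--             segments.append(cur)
--             cur = []
--         else:
--             cur.append(item)
--     segments.append(cur)
--     best = 0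
--     for seg in segments:
--         best = max(best, seg.count('o'))
--     return best
-- ===== Notes on version B (the rewrite author's own statement) =====
-- stated objective: alternative
-- what changed: Replaces A's inline running-counter/aux state machine over nested index loops with a build-then-aggregate pipeline: construct the snake-order cell sequence via slices (reversing odd rows), split it into segments at every 'A', and return the maximum 'o'-count over the segments.
import Mathlib
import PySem

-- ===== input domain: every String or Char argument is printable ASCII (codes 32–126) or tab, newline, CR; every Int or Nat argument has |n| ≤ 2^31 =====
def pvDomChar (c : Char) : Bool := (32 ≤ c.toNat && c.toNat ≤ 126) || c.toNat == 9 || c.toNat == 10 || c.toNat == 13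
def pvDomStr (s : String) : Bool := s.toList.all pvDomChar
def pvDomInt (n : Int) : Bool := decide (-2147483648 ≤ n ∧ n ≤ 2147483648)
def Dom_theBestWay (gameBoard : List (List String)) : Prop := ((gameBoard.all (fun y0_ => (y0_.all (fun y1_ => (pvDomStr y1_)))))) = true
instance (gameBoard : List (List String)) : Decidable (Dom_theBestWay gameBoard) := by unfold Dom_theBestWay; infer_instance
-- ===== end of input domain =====

-- B rebuilds the result as build-the-snake-sequence, split at 'A', max segment 'o'-count
-- (a different decomposition of the same O(n^2) scan; no speed claim).

-- ===== PORT A =====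
-- loop body of A's inner 'for j' (same state (count, aux), same branch order)
def pvStepA (st : Int × Int) (item : String) : Int × Int :=
  if item == "A" then (0, if st.2 < st.1 then st.1 else st.2)
  else if item == "o" then (st.1 + 1, st.2)
  else st

def theBestWay (gameBoard : List (List String)) : Int :=
  -- n = len(gameBoard[0]); gameBoard[0] raises IndexError on [] (excluded by Pre_)
  let n : Int := ((PySem.List.pyGet? gameBoard 0).getD []).length
  let st := (PySem.List.pyRange 0 n 1).foldl (fun st i =>
    (PySem.List.pyRange 0 n 1).foldl (fun st j =>
      let item := if (PySem.Int.mod (i + 1) 2 != 0)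
        then (PySem.List.pyGet? ((PySem.List.pyGet? gameBoard i).getD []) j).getD ""
        else (PySem.List.pyGet? ((PySem.List.pyGet? gameBoard i).getD []) (n - 1 - j)).getD ""
      pvStepA st item) st) (0, 0)
  if st.2 < st.1 then st.1 else st.2

-- ===== PORT B =====
-- loop body of B's split-at-'A' pass: state (segments, cur)
def pvSplitStep (st : List (List String) × List String) (item : String) :
    List (List String) × List String :=
  if item == "A" then (st.1 ++ [st.2], []) else (st.1, st.2 ++ [item])

def theBestWay_alt (gameBoard : List (List String)) : Int :=
  let n : Int := ((PySem.List.pyGet? gameBoard 0).getD []).length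
  let flat := (PySem.List.pyRange 0 n 1).foldl (fun acc i =>
    let row := PySem.List.slice ((PySem.List.pyGet? gameBoard i).getD []) (some 0) (some n)
    acc ++ (if PySem.Int.mod i 2 == 0 then row
            else (PySem.List.slice? row none none (-1)).getD [])) []
  let st := flat.foldl pvSplitStep ([], [])
  (st.1 ++ [st.2]).foldl (fun best seg => max best ((PySem.List.count seg "o" : Int))) 0

-- ===== PRECONDITION & SPEC =====
-- Pre_ = exactly the inputs where A returns: the board is nonempty and, with n = len(gameBoard[0]),
-- rows 0..n-1 exist and each has length ≥ n (otherwise A's gameBoard[i][...] raises IndexError).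
def Pre_theBestWay (gameBoard : List (List String)) : Prop :=
  gameBoard ≠ [] ∧
  (gameBoard.headI.length ≤ gameBoard.length ∧
   ∀ r ∈ gameBoard.take gameBoard.headI.length, gameBoard.headI.length ≤ r.length)
instance (gameBoard : List (List String)) : Decidable (Pre_theBestWay gameBoard) := by
  unfold Pre_theBestWay; infer_instance

def pvWitness_theBestWay : List (List String) := [["o", "A"], ["o", "o"]]

def Spec_theBestWay (gameBoard : List (List String)) (out : Int) : Prop := out = theBestWay_alt gameBoard
instance (gameBoard : List (List String)) (out : Int) : Decidable (Spec_theBestWay gameBoard out) := by unfold Spec_theBestWay; infer_instance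

-- ===== CLAIM (what is proved, stated in full; the proofs are below) =====
def Claim_equal_theBestWay : Prop := ∀ (gameBoard : List (List String)), Dom_theBestWay gameBoard → Pre_theBestWay gameBoard → Spec_theBestWay gameBoard (theBestWay gameBoard)

-- ===== LEMMAS AND PROOFS =====

-- the cells of row i in visiting order (left-to-right for even i, right-to-left for odd i)
def pvRow (gameBoard : List (List String)) (n i : Int) : List String :=
  if PySem.Int.mod i 2 == 0
  then (((PySem.List.pyGet? gameBoard i).getD []).take n.toNat)
  else (((PySem.List.pyGet? gameBoard i).getD []).take n.toNat).reverse

-- max of 'o'-counts over a list of segments (B's final pass)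
def pvMaxSegs (segs : List (List String)) : Int :=
  segs.foldl (fun best seg => max best ((PySem.List.count seg "o" : Int))) 0

theorem pvMaxSegs_append_singleton (segs : List (List String)) (cur : List String) :
    pvMaxSegs (segs ++ [cur]) = max (pvMaxSegs segs) ((PySem.List.count cur "o" : Int)) := by
  simp [pvMaxSegs, List.foldl_append]

-- aggregation invariant: running (count,aux) pass = split-then-max
theorem pv_agg (l : List String) : ∀ (segs : List (List String)) (cur : List String) (c a : Int),
    c = (PySem.List.count cur "o" : Int) → a = pvMaxSegs segs →
    (let st := l.foldl pvStepA (c, a); if st.2 < st.1 then st.1 else st.2)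
      = (let sp := l.foldl pvSplitStep (segs, cur); pvMaxSegs (sp.1 ++ [sp.2])) := by
  induction l with
  | nil =>
    intro segs cur c a hc ha
    subst hc; subst ha
    simp [pvMaxSegs_append_singleton]
    split_ifs <;> omega
  | cons x l ih =>
    intro segs cur c a hc ha
    simp only [List.foldl_cons]
    by_cases hA : x = "A"
    · subst hA
      have h1 : pvStepA (c, a) "A" = (0, if a < c then c else a) := by simp [pvStepA]
      have h2 : pvSplitStep (segs, cur) "A" = (segs ++ [cur], []) := by simp [pvSplitStep]
      rw [h1, h2]
      apply ih
      · simp [PySem.List.count]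
      · rw [pvMaxSegs_append_singleton, ← hc, ← ha]; omega
    · by_cases ho : x = "o"
      · subst ho
        have h1 : pvStepA (c, a) "o" = (c + 1, a) := by simp [pvStepA]
        have h2 : pvSplitStep (segs, cur) "o" = (segs, cur ++ ["o"]) := by
          simp [pvSplitStep]
        rw [h1, h2]
        apply ih _ _ _ _ _ ha
        simp [PySem.List.count, hc]
      · have h1 : pvStepA (c, a) x = (c, a) := by simp [pvStepA, hA, ho]
        have h2 : pvSplitStep (segs, cur) x = (segs, cur ++ [x]) := by
          simp [pvSplitStep, hA]
        rw [h1, h2]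
        apply ih _ _ _ _ _ ha
        simp [PySem.List.count, List.count_append, hc, ho]
  
-- row content: under Pre_, A's per-row j-loop visits exactly pvRow gameBoard n i
theorem pv_rowA (gameBoard : List (List String)) (n i : Int)
    (hi0 : 0 ≤ i) (hin : i < n) (hrows : n ≤ (gameBoard.length : Int))
    (hlen : ∀ r ∈ gameBoard.take n.toNat, n ≤ (r.length : Int)) :
    ((PySem.List.pyRange 0 n 1).map (fun j =>
      if (PySem.Int.mod (i + 1) 2 != 0)
      then (PySem.List.pyGet? ((PySem.List.pyGet? gameBoard i).getD []) j).getD ""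
      else (PySem.List.pyGet? ((PySem.List.pyGet? gameBoard i).getD []) (n - 1 - j)).getD ""))
      = pvRow gameBoard n i := by
  have hi' : i.toNat < gameBoard.length := by omega
  have hget : (PySem.List.pyGet? gameBoard i).getD [] = gameBoard[i.toNat] := by
    have := PySem.List.pyGetD_natCast gameBoard i.toNat ([] : List String)
    rw [show ((i.toNat : Int)) = i by omega] at this
    simp [PySem.List.pyGetD] at this
    rw [this]
    simp [List.getElem?_eq_getElem hi']
  set row := gameBoard[i.toNat] with hrow
  have hmem : row ∈ gameBoard.take n.toNat := by
    rw [hrow]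
    exact List.mem_take_iff_getElem.mpr ⟨i.toNat, by omega, by simp⟩
  have hlr : n ≤ (row.length : Int) := hlen row hmem
  have hm : PySem.Int.mod i 2 = i % 2 := PySem.Int.mod_eq_emod_of_pos (by omega)
  have hm1 : PySem.Int.mod (i + 1) 2 = (i + 1) % 2 := PySem.Int.mod_eq_emod_of_pos (by omega)
  rw [PySem.List.pyRange_one]
  unfold pvRow
  rw [hget]
  simp only [List.map_map, Function.comp_def, zero_add]
  by_cases hp : i % 2 = 0
  · have h1 : (i + 1) % 2 = 1 := by omega
    simp only [hm, hm1, hp, h1]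
    norm_num
    apply List.ext_getElem
    · simp; omega
    · intro k h1 h2
      simp only [List.getElem_map, List.getElem_range]
      have hk : ((k : Int)) < n := by simp at h1; omega
      simp [List.getElem?_eq_getElem (show k < row.length by omega), List.getElem_take]
  · have hp1 : i % 2 = 1 := by omega
    have h1 : (i + 1) % 2 = 0 := by omega
    simp only [hm, hm1, hp1, h1]
    norm_num
    apply List.ext_getElem
    · simp; omega
    · intro k h1 h2
      have hk : ((k : Int)) < n := by simp at h1; omega
      have htl : (List.take n.toNat row).length = n.toNat := by simp; omega
      simp only [List.getElem_map, List.getElem_range, List.getElem_reverse, htl]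
      rw [show n - 1 - (k : Int) = (((n.toNat - 1 - k : Nat)) : Int) by omega]
      have hlt : n.toNat - 1 - k < row.length := by omega
      simp [List.getElem?_eq_getElem hlt, List.getElem_take]

-- row content: B's per-row slice/reverse builds the same pvRow
theorem pv_rowB (gameBoard : List (List String)) (n i : Int)
    (hi0 : 0 ≤ i) (hin : i < n) (hrows : n ≤ (gameBoard.length : Int))
    (hlen : ∀ r ∈ gameBoard.take n.toNat, n ≤ (r.length : Int)) :
    (let row := PySem.List.slice ((PySem.List.pyGet? gameBoard i).getD []) (some 0) (some n)
     if PySem.Int.mod i 2 == 0 then row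
     else (PySem.List.slice? row none none (-1)).getD [])
      = pvRow gameBoard n i := by
  have hi' : i.toNat < gameBoard.length := by omega
  have hget : (PySem.List.pyGet? gameBoard i).getD [] = gameBoard[i.toNat] := by
    have := PySem.List.pyGetD_natCast gameBoard i.toNat ([] : List String)
    rw [show ((i.toNat : Int)) = i by omega] at this
    simp [PySem.List.pyGetD] at this
    rw [this]
    simp [List.getElem?_eq_getElem hi']
  set row := gameBoard[i.toNat] with hrow
  have hmem : row ∈ gameBoard.take n.toNat := by
    rw [hrow]
    exact List.mem_take_iff_getElem.mpr ⟨i.toNat, by omega, by simp⟩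
  have hlr : n ≤ (row.length : Int) := hlen row hmem
  have hslice : PySem.List.slice row (some 0) (some n) = row.take n.toNat := by
    rw [PySem.List.slice_of_nonneg row (by omega) (by omega) (by omega) (by omega)]
    simp
  unfold pvRow
  rw [hget]
  by_cases heven : (2 : Int) ∣ i
  · simp [heven, hslice]
  · simp [heven, hslice, PySem.List.slice?_none_none_neg_one]

-- ===== VERDICT (by name: the statement is the Claim_ definition above) =====
theorem theBestWay_spec : Claim_equal_theBestWay := by
  intro gameBoard _ hpre
  obtain ⟨hne, hrows, hlen⟩ := hpre
  unfold Spec_theBestWay theBestWay theBestWay_alt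
  have hhead : (PySem.List.pyGet? gameBoard 0).getD [] = gameBoard.headI := by
    cases gameBoard with
    | nil => exact absurd rfl hne
    | cons r t => simp [PySem.List.pyGet?, PySem.List.pyIdx?]
  rw [hhead]
  set n : Int := (gameBoard.headI.length : Int) with hn
  have hrows' : n ≤ (gameBoard.length : Int) := by rw [hn]; exact_mod_cast hrows
  have hlen' : ∀ r ∈ gameBoard.take n.toNat, n ≤ (r.length : Int) := by
    intro r hr
    have := hlen r (by simpa [hn] using hr)
    rw [hn]; exact_mod_cast this
  -- A's nested loop = single stepA-fold over the snake sequence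
  have hA : (PySem.List.pyRange 0 n 1).foldl (fun st i =>
      (PySem.List.pyRange 0 n 1).foldl (fun st j =>
        let item := if (PySem.Int.mod (i + 1) 2 != 0)
          then (PySem.List.pyGet? ((PySem.List.pyGet? gameBoard i).getD []) j).getD ""
          else (PySem.List.pyGet? ((PySem.List.pyGet? gameBoard i).getD []) (n - 1 - j)).getD ""
        pvStepA st item) st) ((0 : Int), (0 : Int))
      = ((PySem.List.pyRange 0 n 1).flatMap (pvRow gameBoard n)).foldl pvStepA (0, 0) := by
    rw [List.foldl_flatMap]
    apply PySem.List.foldl_congr_mem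
    intro st i hi
    rw [PySem.List.mem_pyRange_one] at hi
    rw [← pv_rowA gameBoard n i hi.1 hi.2 hrows' hlen', List.foldl_map]
  -- B's flat list is the same snake sequence
  have hB : (PySem.List.pyRange 0 n 1).foldl (fun acc i =>
      let row := PySem.List.slice ((PySem.List.pyGet? gameBoard i).getD []) (some 0) (some n)
      acc ++ (if PySem.Int.mod i 2 == 0 then row
              else (PySem.List.slice? row none none (-1)).getD [])) []
      = (PySem.List.pyRange 0 n 1).flatMap (pvRow gameBoard n) := by
    have hcong := PySem.List.foldl_congr_mem (PySem.List.pyRange 0 n 1)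
      (fun acc i =>
        let row := PySem.List.slice ((PySem.List.pyGet? gameBoard i).getD []) (some 0) (some n)
        acc ++ (if PySem.Int.mod i 2 == 0 then row
                else (PySem.List.slice? row none none (-1)).getD []))
      (fun acc i => acc ++ pvRow gameBoard n i) ([] : List String)
      (by
        intro acc i hi
        rw [PySem.List.mem_pyRange_one] at hi
        simp only
        rw [pv_rowB gameBoard n i hi.1 hi.2 hrows' hlen'])
    rw [hcong, PySem.List.foldl_append_eq_flatMap]
    simp
  simp only [hA, hB]
  have := pv_agg ((PySem.List.pyRange 0 n 1).flatMap (pvRow gameBoard n)) [] [] 0 0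
    (by simp [PySem.List.count]) (by simp [pvMaxSegs])
  simp only at this
  rw [this]
  rfl
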